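-- pv_equiv track=rewrite | github.com/Val-Xuebin/manim_rotation | 2dr/src/meta_shape.py | is_connected_pattern
-- ===== SOURCE A (Python) =====
-- from typing import Any, Dict, List, Optional, Tuple
--
-- def is_connected_pattern(pattern: List[List[int]]) -> bool:
--     rows, cols = len(pattern), len(pattern[0])
--     ones = []
--     for i in range(rows):
--         for j in range(cols):
--             if pattern[i][j] == 1:
--                 ones.append((i, j))
--     if not ones:
--         return False
--     visited = set()
--     stack = [ones[0]]
--     while stack:
--         r, c = stack.pop()
--         if (r, c) in visited:
--             continue
--         visited.add((r, c))
--         for dr, dc in [(0, 1), (0, -1), (1, 0), (-1, 0)]: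
--             nr, nc = r + dr, c + dc
--             if 0 <= nr < rows and 0 <= nc < cols:
--                 if pattern[nr][nc] == 1 and (nr, nc) not in visited:
--                     stack.append((nr, nc))
--
--     return len(visited) == len(ones)
-- ===== SOURCE B (Python) =====
-- def is_connected_pattern(pattern):
--     rows, cols = len(pattern), len(pattern[0])
--     ones = [(i, j) for i in range(rows) for j in range(cols) if pattern[i][j] == 1]
--     if not ones:
--         return False
--     comp = {ones[0]}
--     changed = True
--     while changed:
--         changed = False
--         for (i, j) in ones:
--             if (i, j) not in comp and (
--                 (i - 1, j) in comp or (i + 1, j) in comp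
--                 or (i, j - 1) in comp or (i, j + 1) in comp
--             ):
--                 comp.add((i, j))
--                 changed = True
--     return len(comp) == len(ones)
-- ===== Notes on version B (the rewrite author's own statement) =====
-- stated objective: alternative
-- what changed: A's explicit-stack depth-first search over the grid is replaced by fixpoint label propagation: starting from the first 1-cell, repeatedly sweep the list of 1-cells and absorb any 1-cell adjacent to the current component until a sweep changes nothing; Pre_ excludes only the inputs where A raises IndexError (empty pattern, or a row shorter than row 0).
import Mathlib
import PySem

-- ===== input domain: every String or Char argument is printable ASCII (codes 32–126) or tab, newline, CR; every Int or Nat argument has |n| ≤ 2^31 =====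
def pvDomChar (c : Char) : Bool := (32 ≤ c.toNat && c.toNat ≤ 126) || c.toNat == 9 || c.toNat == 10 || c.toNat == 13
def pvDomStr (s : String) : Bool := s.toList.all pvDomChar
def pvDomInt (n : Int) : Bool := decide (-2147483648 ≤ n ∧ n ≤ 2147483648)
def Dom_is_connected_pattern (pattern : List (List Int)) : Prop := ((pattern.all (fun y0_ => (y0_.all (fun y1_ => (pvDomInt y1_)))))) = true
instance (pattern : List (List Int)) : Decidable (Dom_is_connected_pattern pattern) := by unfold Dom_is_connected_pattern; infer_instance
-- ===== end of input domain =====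

-- B replaces A's explicit-stack depth-first search by fixpoint label propagation
-- (repeated monotone sweeps over the list of 1-cells); objective: alternative.

-- ===== PORT A =====

def pvVal (pattern : List (List Int)) (i j : Int) : Int :=
  (PySem.List.pyGet? ((PySem.List.pyGet? pattern i).getD []) j).getD 0

def pvDirs : List (Int × Int) := [(0, 1), (0, -1), (1, 0), (-1, 0)]

def pvPush (pattern : List (List Int)) (rows cols : Int)
    (visited : PySem.Set (Int × Int)) (r c : Int) (st : List (Int × Int)) : List (Int × Int) :=
  pvDirs.foldl (fun st d =>
    if 0 ≤ r + d.1 ∧ r + d.1 < rows ∧ 0 ≤ c + d.2 ∧ c + d.2 < cols then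
      if pvVal pattern (r + d.1) (c + d.2) = 1 ∧ (r + d.1, c + d.2) ∉ visited then
        st ++ [(r + d.1, c + d.2)]
      else st
    else st) st

def pvDfs (pattern : List (List Int)) (rows cols : Int) :
    Nat → List (Int × Int) → PySem.Set (Int × Int) → PySem.Set (Int × Int)
  | 0, _, visited => visited
  | fuel + 1, stack, visited =>
    match PySem.List.pop? stack (-1) with
    | none => visited
    | some (rc, rest) =>
      if rc ∈ visited then pvDfs pattern rows cols fuel rest visited
      else
        pvDfs pattern rows cols fuel
          (pvPush pattern rows cols (PySem.Set.add visited rc) rc.1 rc.2 rest)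
          (PySem.Set.add visited rc)

def is_connected_pattern (pattern : List (List Int)) : Bool :=
  let rows : Int := pattern.length
  let cols : Int := (((PySem.List.pyGet? pattern 0).getD []).length : Int)
  let ones : List (Int × Int) :=
    (PySem.List.pyRange 0 rows 1).foldl (fun acc i =>
      (PySem.List.pyRange 0 cols 1).foldl (fun acc j =>
        if pvVal pattern i j = 1 then acc ++ [(i, j)] else acc) acc) []
  match ones with
  | [] => false
  | o :: _ =>
    let visited :=
      pvDfs pattern rows cols
        (4 * pattern.length * ((PySem.List.pyGet? pattern 0).getD []).length + 1)
        [o] PySem.Set.empty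
    visited.length == ones.length

-- ===== PORT B =====

def pvOnesB (pattern : List (List Int)) (rows cols : Int) : List (Int × Int) :=
  (PySem.List.pyRange 0 rows 1).flatMap (fun i =>
    ((PySem.List.pyRange 0 cols 1).filter (fun j => pvVal pattern i j == 1)).map (fun j => (i, j)))

def pvSweep (ones : List (Int × Int)) (acc : PySem.Set (Int × Int) × Bool) :
    PySem.Set (Int × Int) × Bool :=
  ones.foldl (fun acc cell =>
    if cell ∉ acc.1 ∧ ((cell.1 - 1, cell.2) ∈ acc.1 ∨ (cell.1 + 1, cell.2) ∈ acc.1 ∨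
        (cell.1, cell.2 - 1) ∈ acc.1 ∨ (cell.1, cell.2 + 1) ∈ acc.1) then
      (PySem.Set.add acc.1 cell, true)
    else acc) acc

def pvBLoop (ones : List (Int × Int)) : Nat → PySem.Set (Int × Int) → PySem.Set (Int × Int)
  | 0, comp => comp
  | fuel + 1, comp =>
    let r := pvSweep ones (comp, false)
    if r.2 then pvBLoop ones fuel r.1 else comp

def is_connected_pattern_alt (pattern : List (List Int)) : Bool :=
  let rows : Int := pattern.length
  let cols : Int := (((PySem.List.pyGet? pattern 0).getD []).length : Int)
  let ones := pvOnesB pattern rows cols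
  match ones with
  | [] => false
  | o :: _ =>
    let comp := pvBLoop ones (ones.length + 1) (PySem.Set.add PySem.Set.empty o)
    comp.length == ones.length

-- ===== PRECONDITION & SPEC =====
-- Pre_ excludes exactly the inputs where the Python A raises IndexError: the empty pattern
-- (pattern[0]) and patterns with a row shorter than row 0 (pattern[i][j] for j < len(pattern[0])).
def Pre_is_connected_pattern (pattern : List (List Int)) : Prop :=
  pattern ≠ [] ∧ ∀ row ∈ pattern, (pattern.headD []).length ≤ row.length

instance (pattern : List (List Int)) : Decidable (Pre_is_connected_pattern pattern) := by
  unfold Pre_is_connected_pattern; infer_instance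

def pvWitness_is_connected_pattern : List (List Int) := [[1, 1], [0, 1]]

def Spec_is_connected_pattern (pattern : List (List Int)) (out : Bool) : Prop :=
  out = is_connected_pattern_alt pattern

instance (pattern : List (List Int)) (out : Bool) : Decidable (Spec_is_connected_pattern pattern out) := by
  unfold Spec_is_connected_pattern; infer_instance

-- ===== CLAIM (what is proved, stated in full; the proofs are below) =====
def Claim_equal_is_connected_pattern : Prop :=
  ∀ (pattern : List (List Int)), Dom_is_connected_pattern pattern →
    Pre_is_connected_pattern pattern →
    Spec_is_connected_pattern pattern (is_connected_pattern pattern)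

-- ===== LEMMAS AND PROOFS =====

def pvNbrs (a : Int × Int) : List (Int × Int) :=
  [(a.1 - 1, a.2), (a.1 + 1, a.2), (a.1, a.2 - 1), (a.1, a.2 + 1)]

def pvClosed (ones S : List (Int × Int)) : Prop :=
  ∀ a ∈ S, ∀ b ∈ pvNbrs a, b ∈ ones → b ∈ S

theorem pvNbrs_symm (a b : Int × Int) : b ∈ pvNbrs a ↔ a ∈ pvNbrs b := by
  obtain ⟨a1, a2⟩ := a; obtain ⟨b1, b2⟩ := b
  simp [pvNbrs, Prod.ext_iff]; omega

theorem pop?_empty : PySem.List.pop? ([] : List (Int × Int)) (-1) = none := by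
  simp [PySem.List.pop?]

theorem pvPush_eq (pattern : List (List Int)) (rows cols : Int)
    (v : PySem.Set (Int × Int)) (r c : Int) (st : List (Int × Int)) :
    pvPush pattern rows cols v r c st =
      st ++ (pvDirs.filter (fun d => decide ((0 ≤ r + d.1 ∧ r + d.1 < rows ∧ 0 ≤ c + d.2 ∧ c + d.2 < cols) ∧
          pvVal pattern (r + d.1) (c + d.2) = 1 ∧ (r + d.1, c + d.2) ∉ v))).map
        (fun d => (r + d.1, c + d.2)) := by
  have hbody : (fun (st : List (Int × Int)) (d : Int × Int) =>
      if 0 ≤ r + d.1 ∧ r + d.1 < rows ∧ 0 ≤ c + d.2 ∧ c + d.2 < cols then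
        if pvVal pattern (r + d.1) (c + d.2) = 1 ∧ (r + d.1, c + d.2) ∉ v then
          st ++ [(r + d.1, c + d.2)]
        else st
      else st)
      = fun st d =>
      if ((0 ≤ r + d.1 ∧ r + d.1 < rows ∧ 0 ≤ c + d.2 ∧ c + d.2 < cols) ∧
          pvVal pattern (r + d.1) (c + d.2) = 1 ∧ (r + d.1, c + d.2) ∉ v) then
        st ++ [(r + d.1, c + d.2)]
      else st := by
    funext st d; split_ifs <;> first | rfl | tauto
  unfold pvPush
  rw [hbody, PySem.List.foldl_append_ite]

theorem pvPush_mem (pattern : List (List Int)) (rows cols : Int)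
    (v : PySem.Set (Int × Int)) (r c : Int) (st : List (Int × Int)) (x : Int × Int) :
    x ∈ pvPush pattern rows cols v r c st ↔
      x ∈ st ∨ (x ∈ pvNbrs (r, c) ∧ (0 ≤ x.1 ∧ x.1 < rows ∧ 0 ≤ x.2 ∧ x.2 < cols) ∧
        pvVal pattern x.1 x.2 = 1 ∧ x ∉ v) := by
  obtain ⟨x1, x2⟩ := x
  rw [pvPush_eq]
  simp only [List.mem_append, List.mem_map, List.mem_filter, pvDirs, pvNbrs,
    List.mem_cons, List.not_mem_nil, or_false, decide_eq_true_eq]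
  constructor
  · rintro (h | ⟨d, ⟨hd, hcond⟩, hfd⟩)
    · exact Or.inl h
    · injection hfd with e1 e2
      subst e1; subst e2
      right
      exact ⟨by rcases hd with rfl | rfl | rfl | rfl <;> simp [Prod.ext_iff] <;> omega,
        hcond.1, hcond.2.1, hcond.2.2⟩
  · rintro (h | ⟨hn, hb, hv, hnv⟩)
    · exact Or.inl h
    · right
      rcases hn with hn | hn | hn | hn <;> rw [Prod.ext_iff] at hn <;> simp at hn <;>
        obtain ⟨hn1, hn2⟩ := hn
      · refine ⟨(-1, 0), ?_⟩
        have e1 : r + ((-1:ℤ), (0:ℤ)).1 = x1 := by simp; omega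
        have e2 : c + ((-1:ℤ), (0:ℤ)).2 = x2 := by simp; omega
        simp only [e1, e2]
        exact ⟨⟨by simp, hb, hv, hnv⟩, trivial⟩
      · refine ⟨(1, 0), ?_⟩
        have e1 : r + ((1:ℤ), (0:ℤ)).1 = x1 := by simp; omega
        have e2 : c + ((1:ℤ), (0:ℤ)).2 = x2 := by simp; omega
        simp only [e1, e2]
        exact ⟨⟨by simp, hb, hv, hnv⟩, trivial⟩
      · refine ⟨(0, -1), ?_⟩
        have e1 : r + ((0:ℤ), (-1:ℤ)).1 = x1 := by simp; omega
        have e2 : c + ((0:ℤ), (-1:ℤ)).2 = x2 := by simp; omega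
        simp only [e1, e2]
        exact ⟨⟨by simp, hb, hv, hnv⟩, trivial⟩
      · refine ⟨(0, 1), ?_⟩
        have e1 : r + ((0:ℤ), (1:ℤ)).1 = x1 := by simp; omega
        have e2 : c + ((0:ℤ), (1:ℤ)).2 = x2 := by simp; omega
        simp only [e1, e2]
        exact ⟨⟨by simp, hb, hv, hnv⟩, trivial⟩

theorem pvPush_length (pattern : List (List Int)) (rows cols : Int)
    (v : PySem.Set (Int × Int)) (r c : Int) (st : List (Int × Int)) :
    (pvPush pattern rows cols v r c st).length ≤ st.length + 4 := by
  rw [pvPush_eq]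
  have := List.length_filter_le (fun d => decide ((0 ≤ r + d.1 ∧ r + d.1 < rows ∧ 0 ≤ c + d.2 ∧ c + d.2 < cols) ∧
          pvVal pattern (r + d.1) (c + d.2) = 1 ∧ (r + d.1, c + d.2) ∉ v)) pvDirs
  simp only [List.length_append, List.length_map]
  simp [pvDirs] at this ⊢
  omega

theorem pvOnesA_eq (pattern : List (List Int)) (rows cols : Int) :
    (PySem.List.pyRange 0 rows 1).foldl (fun acc i =>
      (PySem.List.pyRange 0 cols 1).foldl (fun acc j =>
        if pvVal pattern i j = 1 then acc ++ [(i, j)] else acc) acc) [] =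
      pvOnesB pattern rows cols := by
  have hinner : ∀ (acc : List (Int × Int)) (i : Int),
      (PySem.List.pyRange 0 cols 1).foldl (fun acc j =>
        if pvVal pattern i j = 1 then acc ++ [(i, j)] else acc) acc =
      acc ++ ((PySem.List.pyRange 0 cols 1).filter (fun j => pvVal pattern i j == 1)).map
        (fun j => (i, j)) := by
    intro acc i
    rw [PySem.List.foldl_append_ite (fun j => pvVal pattern i j = 1) (fun j => (i, j))]
    rfl
  have hb : (fun (acc : List (Int × Int)) (i : Int) =>
      (PySem.List.pyRange 0 cols 1).foldl (fun acc j =>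
        if pvVal pattern i j = 1 then acc ++ [(i, j)] else acc) acc) =
      fun acc i => acc ++ ((PySem.List.pyRange 0 cols 1).filter
        (fun j => pvVal pattern i j == 1)).map (fun j => (i, j)) := by
    funext acc i; exact hinner acc i
  rw [hb, PySem.List.foldl_append_eq_flatMap]
  rfl

theorem mem_onesB (pattern : List (List Int)) (rows cols : Int) (x : Int × Int) :
    x ∈ pvOnesB pattern rows cols ↔
      (0 ≤ x.1 ∧ x.1 < rows ∧ 0 ≤ x.2 ∧ x.2 < cols) ∧ pvVal pattern x.1 x.2 = 1 := by
  obtain ⟨x1, x2⟩ := x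
  simp [pvOnesB, List.mem_flatMap, List.mem_filter, List.mem_map,
    PySem.List.mem_pyRange_one]
  tauto

theorem nodup_onesB (pattern : List (List Int)) (rows cols : Int) :
    (pvOnesB pattern rows cols).Nodup := by
  unfold pvOnesB
  rw [List.nodup_flatMap]
  constructor
  · intro i _
    exact (List.Nodup.filter _ (PySem.List.nodup_pyRange_one 0 cols)).map
      (fun a b h => by simpa using congrArg Prod.snd h)
  · refine List.Pairwise.imp ?_ (PySem.List.nodup_pyRange_one 0 rows)
    intro a b hab
    intro x hxa hxb
    simp only [List.mem_map, List.mem_filter] at hxa hxb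
    obtain ⟨j, _, rfl⟩ := hxa
    obtain ⟨j', _, e⟩ := hxb
    rw [Prod.ext_iff] at e
    simp only at e
    exact hab e.1.symm

theorem length_onesB_le (pattern : List (List Int)) (rows cols : Int) :
    (pvOnesB pattern rows cols).length ≤ (rows.toNat) * (cols.toNat) := by
  unfold pvOnesB
  rw [List.length_flatMap]
  have hb : ∀ n ∈ (List.map (fun i => (((PySem.List.pyRange 0 cols 1).filter
      (fun j => pvVal pattern i j == 1)).map (fun j => ((i : Int), j))).length)
      (PySem.List.pyRange 0 rows 1)), n ≤ cols.toNat := by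
    intro n hn
    simp only [List.mem_map] at hn
    obtain ⟨i, _, rfl⟩ := hn
    calc _ ≤ (PySem.List.pyRange 0 cols 1).length := by
              simp only [List.length_map]; exact List.length_filter_le _ _
      _ = cols.toNat := by rw [PySem.List.length_pyRange_one]; omega
  calc _ ≤ _ := List.sum_le_card_nsmul _ _ hb
    _ = _ := by simp [List.length_map, PySem.List.length_pyRange_one]

theorem pvDfs_nodup (pattern : List (List Int)) (rows cols : Int) :
    ∀ (fuel : Nat) (st : List (Int × Int)) (visited : PySem.Set (Int × Int)),
      visited.Nodup → (pvDfs pattern rows cols fuel st visited).Nodup := by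
  intro fuel
  induction fuel with
  | zero => intro st visited h; exact h
  | succ n ih =>
    intro st visited h
    rcases List.eq_nil_or_concat st with rfl | ⟨ys, y, rfl⟩
    · simpa [pvDfs, pop?_empty] using h
    · rw [pvDfs, List.concat_eq_append, PySem.List.pop?_last]
      dsimp only
      by_cases hy : y ∈ visited
      · simpa [hy] using ih ys visited h
      · simpa [hy] using ih _ _ (PySem.Set.nodup_add visited y h)

theorem pvDfs_sound (pattern : List (List Int)) (rows cols : Int)
    (S : List (Int × Int)) (hcl : pvClosed (pvOnesB pattern rows cols) S) :
    ∀ (fuel : Nat) (st : List (Int × Int)) (visited : PySem.Set (Int × Int)),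
      (∀ x ∈ st, x ∈ S) → (∀ x ∈ visited, x ∈ S) →
      ∀ x ∈ pvDfs pattern rows cols fuel st visited, x ∈ S := by
  intro fuel
  induction fuel with
  | zero => intro st visited _ hv x hx; exact hv x hx
  | succ n ih =>
    intro st visited hst hv x hx
    rcases List.eq_nil_or_concat st with rfl | ⟨ys, y, rfl⟩
    · rw [pvDfs, pop?_empty] at hx; exact hv x hx
    · rw [pvDfs, List.concat_eq_append, PySem.List.pop?_last] at hx
      dsimp only at hx
      by_cases hy : y ∈ visited
      · rw [if_pos hy] at hx
        exact ih ys visited (fun z hz => hst z (by simp [hz])) hv x hx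
      · rw [if_neg hy] at hx
        have hyS : y ∈ S := hst y (by simp)
        have hv' : ∀ z ∈ PySem.Set.add visited y, z ∈ S := by
          intro z hz
          rcases (PySem.Set.mem_add visited y z).mp hz with h | rfl
          · exact hv z h
          · exact hyS
        refine ih _ _ ?_ hv' x hx
        intro z hz
        rcases (pvPush_mem pattern rows cols _ y.1 y.2 ys z).mp hz with h | ⟨hn, hb, hval, _⟩
        · exact hst z (by simp [h])
        · exact hcl y hyS z (by simpa using hn) ((mem_onesB pattern rows cols z).mpr ⟨hb, hval⟩)

theorem filter_not_mem_add (ones visited : List (Int × Int)) (x : Int × Int)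
    (hnd : ones.Nodup) (hx : x ∈ ones) (hxv : x ∉ visited) :
    (ones.filter (fun z => decide (z ∉ visited ++ [x]))).length + 1 =
    (ones.filter (fun z => decide (z ∉ visited))).length := by
  have hsplit : ones.filter (fun z => decide (z ∉ visited ++ [x])) =
      (ones.filter (fun z => decide (z ∉ visited))).filter (fun z => z != x) := by
    rw [List.filter_filter]
    apply List.filter_congr
    intro z _
    by_cases hzv : z ∈ visited <;> by_cases hzx : z = x <;> simp [hzv, hzx]
  rw [hsplit]
  have hm : x ∈ ones.filter (fun z => decide (z ∉ visited)) :=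
    List.mem_filter.mpr ⟨hx, by simpa using hxv⟩
  have hndf : (ones.filter (fun z => decide (z ∉ visited))).Nodup := hnd.filter _
  rw [← List.Nodup.erase_eq_filter hndf x, List.length_erase_of_mem hm]
  have := List.length_pos_of_mem hm
  omega

theorem pvDfs_main (pattern : List (List Int)) (rows cols : Int)
    (hnd : (pvOnesB pattern rows cols).Nodup) :
    ∀ (fuel : Nat) (st : List (Int × Int)) (visited : PySem.Set (Int × Int)),
      (∀ x ∈ st, x ∈ pvOnesB pattern rows cols) →
      (∀ x ∈ visited, x ∈ pvOnesB pattern rows cols) →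
      visited.Nodup →
      (∀ v ∈ visited, ∀ n ∈ pvNbrs v, n ∈ pvOnesB pattern rows cols → n ∈ visited ∨ n ∈ st) →
      st.length + 4 * ((pvOnesB pattern rows cols).filter (fun z => decide (z ∉ visited))).length ≤ fuel →
      (∀ x ∈ st, x ∈ pvDfs pattern rows cols fuel st visited) ∧
      (∀ x ∈ visited, x ∈ pvDfs pattern rows cols fuel st visited) ∧
      pvClosed (pvOnesB pattern rows cols) (pvDfs pattern rows cols fuel st visited) := by
  intro fuel
  induction fuel with
  | zero =>
    intro st visited hst hv hndv hinv hfuel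
    have hst0 : st = [] := by
      cases st with
      | nil => rfl
      | cons a t => simp at hfuel
    subst hst0
    refine ⟨by simp, fun x hx => hx, ?_⟩
    intro a ha b hb hbo
    rcases hinv a ha b hb hbo with h | h
    · exact h
    · simp at h
  | succ n ih =>
    intro st visited hst hv hndv hinv hfuel
    rcases List.eq_nil_or_concat st with rfl | ⟨ys, y, rfl⟩
    · rw [pvDfs, pop?_empty]
      refine ⟨by simp, fun x hx => hx, ?_⟩
      intro a ha b hb hbo
      rcases hinv a ha b hb hbo with h | h
      · exact h
      · simp at h
    · rw [pvDfs, List.concat_eq_append, PySem.List.pop?_last]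
      dsimp only
      by_cases hy : y ∈ visited
      · rw [if_pos hy]
        have hres := ih ys visited
          (fun z hz => hst z (by simp [hz])) hv hndv
          (by
            intro v hvv nn hnn hno
            rcases hinv v hvv nn hnn hno with h | h
            · exact Or.inl h
            · rcases (show nn ∈ ys ∨ nn = y by simpa using h) with h' | h'
              · exact Or.inr h'
              · rw [h']
                exact Or.inl hy)
          (by simp at hfuel ⊢; omega)
        exact ⟨by
          intro x hx
          rcases List.mem_append.mp hx with h | h
          · exact hres.1 x h
          · simp at h; rw [h]; exact hres.2.1 y hy,
          hres.2.1, hres.2.2⟩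
      · rw [if_neg hy]
        have hyo : y ∈ pvOnesB pattern rows cols := hst y (by simp)
        have hadd : PySem.Set.add visited y = visited ++ [y] := PySem.Set.add_of_not_mem hy
        have hv' : ∀ x ∈ PySem.Set.add visited y, x ∈ pvOnesB pattern rows cols := by
          intro x hx
          rcases (PySem.Set.mem_add visited y x).mp hx with h | rfl
          · exact hv x h
          · exact hyo
        have hnd' : (PySem.Set.add visited y).Nodup := PySem.Set.nodup_add visited y hndv
        have hstsub : ∀ z ∈ ys, z ∈ pvPush pattern rows cols (PySem.Set.add visited y) y.1 y.2 ys := by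
          intro z hz
          exact (pvPush_mem pattern rows cols _ y.1 y.2 ys z).mpr (Or.inl hz)
        have hst' : ∀ x ∈ pvPush pattern rows cols (PySem.Set.add visited y) y.1 y.2 ys,
            x ∈ pvOnesB pattern rows cols := by
          intro z hz
          rcases (pvPush_mem pattern rows cols _ y.1 y.2 ys z).mp hz with h | ⟨_, hb, hval, _⟩
          · exact hst z (by simp [h])
          · exact (mem_onesB pattern rows cols z).mpr ⟨hb, hval⟩
        have hinv' : ∀ v ∈ PySem.Set.add visited y, ∀ nn ∈ pvNbrs v,
            nn ∈ pvOnesB pattern rows cols →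
            nn ∈ PySem.Set.add visited y ∨ nn ∈ pvPush pattern rows cols (PySem.Set.add visited y) y.1 y.2 ys := by
          intro v hvv nn hnn hno
          rcases (PySem.Set.mem_add visited y v).mp hvv with hvv' | rfl
          · rcases hinv v hvv' nn hnn hno with h | h
            · exact Or.inl ((PySem.Set.mem_add visited y nn).mpr (Or.inl h))
            · rcases (show nn ∈ ys ∨ nn = y by simpa using h) with h' | h'
              · exact Or.inr (hstsub nn h')
              · rw [h']
                exact Or.inl ((PySem.Set.mem_add visited y y).mpr (Or.inr rfl))
          · by_cases hmem : nn ∈ PySem.Set.add visited v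
            · exact Or.inl hmem
            · refine Or.inr ((pvPush_mem pattern rows cols _ v.1 v.2 ys nn).mpr (Or.inr ⟨?_, ?_, ?_, hmem⟩))
              · simpa using hnn
              · exact ((mem_onesB pattern rows cols nn).mp hno).1
              · exact ((mem_onesB pattern rows cols nn).mp hno).2
        have hfuel' : (pvPush pattern rows cols (PySem.Set.add visited y) y.1 y.2 ys).length +
            4 * ((pvOnesB pattern rows cols).filter (fun z => decide (z ∉ PySem.Set.add visited y))).length ≤ n := by
          have h1 := pvPush_length pattern rows cols (PySem.Set.add visited y) y.1 y.2 ys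
          have h2 : ((pvOnesB pattern rows cols).filter (fun z => decide (z ∉ visited ++ [y]))).length + 1 =
              ((pvOnesB pattern rows cols).filter (fun z => decide (z ∉ visited))).length :=
            filter_not_mem_add _ _ _ hnd hyo hy
          rw [hadd] at h1 ⊢
          rw [List.length_concat] at hfuel
          omega
        have hres := ih _ _ hst' hv' hnd' hinv' hfuel'
        refine ⟨?_, ?_, hres.2.2⟩
        · intro x hx
          rcases List.mem_append.mp hx with h | h
          · exact hres.1 x (hstsub x h)
          · simp at h; rw [h]
            exact hres.2.1 y ((PySem.Set.mem_add visited y y).mpr (Or.inr rfl))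
        · intro x hx
          exact hres.2.1 x ((PySem.Set.mem_add visited y x).mpr (Or.inl hx))

theorem pvSweep_cons (ones : List (Int × Int)) (cell : Int × Int) (acc : PySem.Set (Int × Int) × Bool) :
    pvSweep (cell :: ones) acc =
      pvSweep ones (if cell ∉ acc.1 ∧ ((cell.1 - 1, cell.2) ∈ acc.1 ∨ (cell.1 + 1, cell.2) ∈ acc.1 ∨
        (cell.1, cell.2 - 1) ∈ acc.1 ∨ (cell.1, cell.2 + 1) ∈ acc.1) then
        (PySem.Set.add acc.1 cell, true) else acc) := rfl

theorem pvSweep_true (ones : List (Int × Int)) :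
    ∀ (acc : PySem.Set (Int × Int) × Bool), acc.2 = true → (pvSweep ones acc).2 = true := by
  induction ones with
  | nil => intro acc h; exact h
  | cons cell t ih =>
    intro acc h
    rw [pvSweep_cons]
    split_ifs with hc
    · exact ih _ rfl
    · exact ih _ h

theorem pvSweep_mono (ones : List (Int × Int)) :
    ∀ (acc : PySem.Set (Int × Int) × Bool),
      (∀ x ∈ acc.1, x ∈ (pvSweep ones acc).1) ∧
      (∀ x ∈ (pvSweep ones acc).1, x ∈ acc.1 ∨ x ∈ ones) ∧
      (acc.1.Nodup → (pvSweep ones acc).1.Nodup) ∧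
      acc.1.length ≤ (pvSweep ones acc).1.length := by
  induction ones with
  | nil => intro acc; exact ⟨fun x h => h, fun x h => Or.inl h, fun h => h, le_refl _⟩
  | cons cell t ih =>
    intro acc
    rw [pvSweep_cons]
    split_ifs with hc
    · obtain ⟨ih1, ih2, ih3, ih4⟩ := ih (PySem.Set.add acc.1 cell, true)
      have hadd : PySem.Set.add acc.1 cell = acc.1 ++ [cell] := PySem.Set.add_of_not_mem hc.1
      refine ⟨?_, ?_, ?_, ?_⟩
      · intro x hx
        exact ih1 x ((PySem.Set.mem_add acc.1 cell x).mpr (Or.inl hx))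
      · intro x hx
        rcases ih2 x hx with h | h
        · rcases (PySem.Set.mem_add acc.1 cell x).mp h with h' | rfl
          · exact Or.inl h'
          · exact Or.inr (by simp)
        · exact Or.inr (by simp [h])
      · intro h
        exact ih3 (PySem.Set.nodup_add acc.1 cell h)
      · calc acc.1.length ≤ (PySem.Set.add acc.1 cell).length := by rw [hadd]; simp
          _ ≤ _ := ih4
    · obtain ⟨ih1, ih2, ih3, ih4⟩ := ih acc
      refine ⟨ih1, ?_, ih3, ih4⟩
      intro x hx
      rcases ih2 x hx with h | h
      · exact Or.inl h
      · exact Or.inr (by simp [h])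

theorem pvSweep_grow (ones : List (Int × Int)) :
    ∀ (comp : PySem.Set (Int × Int)), comp.Nodup → (pvSweep ones (comp, false)).2 = true →
      comp.length < (pvSweep ones (comp, false)).1.length := by
  induction ones with
  | nil => intro comp _ h; simp [pvSweep] at h
  | cons cell t ih =>
    intro comp hnd h
    rw [pvSweep_cons] at h ⊢
    split_ifs at h ⊢ with hc
    · show comp.length < (pvSweep t (PySem.Set.add comp cell, true)).1.length
      have hadd : PySem.Set.add comp cell = comp ++ [cell] :=
        PySem.Set.add_of_not_mem (by exact hc.1)
      have hm := (pvSweep_mono t (PySem.Set.add comp cell, true)).2.2.2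
      rw [hadd] at hm ⊢
      simp only [List.length_append, List.length_cons, List.length_nil] at hm
      omega
    · exact ih comp hnd h

theorem pvSweep_fix (ones : List (Int × Int)) :
    ∀ (comp : PySem.Set (Int × Int)), (pvSweep ones (comp, false)).2 = false →
      ∀ cell ∈ ones, cell ∉ comp →
        ¬((cell.1 - 1, cell.2) ∈ comp ∨ (cell.1 + 1, cell.2) ∈ comp ∨
          (cell.1, cell.2 - 1) ∈ comp ∨ (cell.1, cell.2 + 1) ∈ comp) := by
  induction ones with
  | nil => intro comp _ cell hc; simp at hc
  | cons c0 t ih =>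
    intro comp h cell hcell hnc
    rw [pvSweep_cons] at h
    split_ifs at h with hc
    · have ht := pvSweep_true t (PySem.Set.add comp c0, true) rfl
      simp [h] at ht
    · rcases List.mem_cons.mp hcell with rfl | hcell'
      · intro hor; exact hc ⟨hnc, hor⟩
      · exact ih comp h cell hcell' hnc

theorem pvSweep_min (ones S : List (Int × Int)) (allOnes : List (Int × Int))
    (hones : ∀ x ∈ ones, x ∈ allOnes) (hcl : pvClosed allOnes S) :
    ∀ (acc : PySem.Set (Int × Int) × Bool), (∀ x ∈ acc.1, x ∈ S) →
      ∀ x ∈ (pvSweep ones acc).1, x ∈ S := by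
  induction ones with
  | nil => intro acc h x hx; exact h x hx
  | cons cell t ih =>
    intro acc hacc x hx
    rw [pvSweep_cons] at hx
    split_ifs at hx with hc
    · refine ih (fun z hz => hones z (by simp [hz])) _ ?_ x hx
      intro z hz
      rcases (PySem.Set.mem_add acc.1 cell z).mp hz with h | rfl
      · exact hacc z h
      · rcases hc.2 with hm | hm | hm | hm
        all_goals
          refine hcl _ (hacc _ hm) z ?_ (hones z (by simp)) <;> simp [pvNbrs, Prod.ext_iff] <;> omega
    · exact ih (fun z hz => hones z (by simp [hz])) acc hacc x hx

theorem pvBLoop_main (allOnes : List (Int × Int)) (hnd : allOnes.Nodup) :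
    ∀ (fuel : Nat) (comp : PySem.Set (Int × Int)), comp.Nodup →
      (∀ x ∈ comp, x ∈ allOnes) →
      allOnes.length + 1 ≤ fuel + comp.length →
      (∀ x ∈ comp, x ∈ pvBLoop allOnes fuel comp) ∧
      (∀ x ∈ pvBLoop allOnes fuel comp, x ∈ allOnes) ∧
      (pvBLoop allOnes fuel comp).Nodup ∧
      pvClosed allOnes (pvBLoop allOnes fuel comp) ∧
      (∀ S, pvClosed allOnes S → (∀ x ∈ comp, x ∈ S) → ∀ x ∈ pvBLoop allOnes fuel comp, x ∈ S) := by
  intro fuel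
  induction fuel with
  | zero =>
    intro comp hc hsub hlen
    exact absurd ((List.subperm_of_subset hc hsub).length_le) (by simp at hlen ⊢; omega)
  | succ n ih =>
    intro comp hc hsub hlen
    rw [pvBLoop]
    by_cases hch : (pvSweep allOnes (comp, false)).2 = true
    · rw [if_pos hch]
      obtain ⟨m1, m2, m3, m4⟩ := pvSweep_mono allOnes (comp, false)
      have hgrow := pvSweep_grow allOnes comp hc hch
      have hres := ih (pvSweep allOnes (comp, false)).1 (m3 hc)
        (by
          intro x hx
          rcases m2 x hx with h | h
          · exact hsub x h
          · exact h)
        (by omega)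
      refine ⟨?_, hres.2.1, hres.2.2.1, hres.2.2.2.1, ?_⟩
      · intro x hx
        exact hres.1 x (m1 x hx)
      · intro S hclS hcompS x hx
        exact hres.2.2.2.2 S hclS (pvSweep_min allOnes S allOnes (fun z hz => hz) hclS (comp, false) hcompS) x hx
    · rw [if_neg hch]
      have hfix := pvSweep_fix allOnes comp (by simpa using hch)
      refine ⟨fun x hx => hx, hsub, hc, ?_, fun S _ hcompS x hx => hcompS x hx⟩
      intro a ha b hb hbo
      by_cases hbc : b ∈ comp
      · exact hbc
      · exfalso
        refine hfix b hbo hbc ?_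
        rw [pvNbrs_symm] at hb
        rcases (show a = (b.1 - 1, b.2) ∨ a = (b.1 + 1, b.2) ∨ a = (b.1, b.2 - 1) ∨ a = (b.1, b.2 + 1) by
            simpa [pvNbrs] using hb) with h | h | h | h
        · exact Or.inl (h ▸ ha)
        · exact Or.inr (Or.inl (h ▸ ha))
        · exact Or.inr (Or.inr (Or.inl (h ▸ ha)))
        · exact Or.inr (Or.inr (Or.inr (h ▸ ha)))

theorem ports_eq (pattern : List (List Int)) :
    is_connected_pattern pattern = is_connected_pattern_alt pattern := by
  simp only [is_connected_pattern, is_connected_pattern_alt, pvOnesA_eq]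
  cases hO : pvOnesB pattern (pattern.length : Int)
      (((PySem.List.pyGet? pattern 0).getD []).length : Int) with
  | nil => rfl
  | cons o rest =>
    dsimp only
    rw [← hO]
    have hndO := nodup_onesB pattern (pattern.length : Int)
      (((PySem.List.pyGet? pattern 0).getD []).length : Int)
    have hoO : o ∈ pvOnesB pattern (pattern.length : Int)
        (((PySem.List.pyGet? pattern 0).getD []).length : Int) := by rw [hO]; simp
    have hclO : pvClosed (pvOnesB pattern (pattern.length : Int)
        (((PySem.List.pyGet? pattern 0).getD []).length : Int))
        (pvOnesB pattern (pattern.length : Int)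
        (((PySem.List.pyGet? pattern 0).getD []).length : Int)) :=
      fun _ _ b _ hbo => hbo
    -- A side
    have hAfuel : ([o] : List (Int × Int)).length + 4 * ((pvOnesB pattern (pattern.length : Int)
        (((PySem.List.pyGet? pattern 0).getD []).length : Int)).filter
          (fun z => decide (z ∉ (PySem.Set.empty : PySem.Set (Int × Int))))).length ≤
        4 * pattern.length * ((PySem.List.pyGet? pattern 0).getD []).length + 1 := by
      have hlen := length_onesB_le pattern (pattern.length : Int)
        (((PySem.List.pyGet? pattern 0).getD []).length : Int)
      simp only [Int.toNat_natCast] at hlen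
      have hfe : ((pvOnesB pattern (pattern.length : Int)
          (((PySem.List.pyGet? pattern 0).getD []).length : Int)).filter
            (fun z => decide (z ∉ (PySem.Set.empty : PySem.Set (Int × Int))))).length =
          (pvOnesB pattern (pattern.length : Int)
          (((PySem.List.pyGet? pattern 0).getD []).length : Int)).length := by
        congr 1
        apply List.filter_eq_self.mpr
        intro a _
        simp [PySem.Set.empty]
      rw [hfe]
      simp only [List.length_cons, List.length_nil]
      have hmul : 4 * pattern.length * ((PySem.List.pyGet? pattern 0).getD []).length =
          4 * (pattern.length * ((PySem.List.pyGet? pattern 0).getD []).length) :=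
        Nat.mul_assoc 4 _ _
      omega
    have hA := pvDfs_main pattern (pattern.length : Int)
      (((PySem.List.pyGet? pattern 0).getD []).length : Int) hndO
      (4 * pattern.length * ((PySem.List.pyGet? pattern 0).getD []).length + 1)
      [o] PySem.Set.empty
      (by intro x hx; simp at hx; rw [hx]; exact hoO)
      (by intro x hx; simp [PySem.Set.empty] at hx)
      (by simp [PySem.Set.empty])
      (by intro v hv; simp [PySem.Set.empty] at hv)
      hAfuel
    have hVnd := pvDfs_nodup pattern (pattern.length : Int)
      (((PySem.List.pyGet? pattern 0).getD []).length : Int)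
      (4 * pattern.length * ((PySem.List.pyGet? pattern 0).getD []).length + 1)
      [o] PySem.Set.empty (by simp [PySem.Set.empty])
    have hVsub := pvDfs_sound pattern (pattern.length : Int)
      (((PySem.List.pyGet? pattern 0).getD []).length : Int) _ hclO
      (4 * pattern.length * ((PySem.List.pyGet? pattern 0).getD []).length + 1)
      [o] PySem.Set.empty
      (by intro x hx; simp at hx; rw [hx]; exact hoO)
      (by intro x hx; simp [PySem.Set.empty] at hx)
    -- B side
    have haddo : PySem.Set.add (PySem.Set.empty : PySem.Set (Int × Int)) o = [o] := by
      rw [PySem.Set.add_of_not_mem (by simp [PySem.Set.empty])]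
      rfl
    rw [haddo]
    have hB := pvBLoop_main (pvOnesB pattern (pattern.length : Int)
        (((PySem.List.pyGet? pattern 0).getD []).length : Int)) hndO
      ((pvOnesB pattern (pattern.length : Int)
        (((PySem.List.pyGet? pattern 0).getD []).length : Int)).length + 1)
      [o] (by simp)
      (by intro x hx; simp at hx; rw [hx]; exact hoO)
      (by omega)
    -- mutual inclusion
    have hVF : ∀ x ∈ pvDfs pattern (pattern.length : Int)
        (((PySem.List.pyGet? pattern 0).getD []).length : Int)
        (4 * pattern.length * ((PySem.List.pyGet? pattern 0).getD []).length + 1)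
        [o] PySem.Set.empty, x ∈ pvBLoop (pvOnesB pattern (pattern.length : Int)
        (((PySem.List.pyGet? pattern 0).getD []).length : Int))
        ((pvOnesB pattern (pattern.length : Int)
        (((PySem.List.pyGet? pattern 0).getD []).length : Int)).length + 1) [o] := by
      refine pvDfs_sound pattern _ _ _ hB.2.2.2.1 _ [o] PySem.Set.empty ?_ ?_
      · intro x hx; simp at hx; rw [hx]; exact hB.1 o (by simp)
      · intro x hx; simp [PySem.Set.empty] at hx
    have hFV : ∀ x ∈ pvBLoop (pvOnesB pattern (pattern.length : Int)
        (((PySem.List.pyGet? pattern 0).getD []).length : Int))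
        ((pvOnesB pattern (pattern.length : Int)
        (((PySem.List.pyGet? pattern 0).getD []).length : Int)).length + 1) [o],
        x ∈ pvDfs pattern (pattern.length : Int)
        (((PySem.List.pyGet? pattern 0).getD []).length : Int)
        (4 * pattern.length * ((PySem.List.pyGet? pattern 0).getD []).length + 1)
        [o] PySem.Set.empty := by
      refine hB.2.2.2.2 _ hA.2.2 ?_
      intro x hx; simp at hx; rw [hx]; exact hA.1 o (by simp)
    have hperm := (List.perm_ext_iff_of_nodup hVnd hB.2.2.1).mpr
      (fun a => ⟨fun ha => hVF a ha, fun ha => hFV a ha⟩)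
    rw [hperm.length_eq]

-- ===== VERDICT (by name: the statement is the Claim_ definition above) =====
theorem is_connected_pattern_spec : Claim_equal_is_connected_pattern := by
  intro pattern _ _
  exact ports_eq pattern
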